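-- pv_equiv track=rewrite | github.com/tjs8938/AdventOfCode | src/AoC_2016/Day16/part1.py | checksum_for_data_size
-- ===== SOURCE A (Python) =====
-- seed: str = "00101000101111010"
--
-- def checksum_for_data_size(data_size):
--     a = seed
--     while len(a) < data_size:
--         b = ""
--         for c in a[::-1]:
--             b += ('1' if c == '0' else '0')
--         a = a + '0' + b
--     a = a[:data_size]
--     block_size = 1
--     block_count = len(a)
--     while block_count % 2 == 0:
--         block_count = block_count >> 1
--         block_size = block_size << 1
--     checksum = ""
--     for i in range(block_count):
--         block = a[i * block_size:(i + 1) * block_size]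
--         if block.count('1') % 2 == 0:
--             checksum += '1'
--         else:
--             checksum += '0'
--     return checksum
-- ===== SOURCE B (Python) =====
-- seed: str = "00101000101111010"
--
-- def checksum_for_data_size(data_size):
--     a = seed
--     while len(a) < data_size:
--         a = a + '0' + ''.join('1' if c == '0' else '0' for c in reversed(a))
--     a = a[:data_size]
--     block_size = 1
--     while (len(a) // block_size) % 2 == 0:
--         block_size *= 2
--     out = []
--     parity = True  # True while the current block holds an even number of '1's
--     pos = 0
--     for c in a:
--         pos += 1
--         if c == '1':
--             parity = not parity
--         if pos % block_size == 0:
--             out.append('1' if parity else '0')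
--             parity = True
--     return ''.join(out)
-- ===== Notes on version B (the rewrite author's own statement) =====
-- stated objective: alternative
-- what changed: The checksum phase is rewritten as a single streaming pass that keeps a running block parity and emits one output character whenever a block boundary is reached, instead of indexing out each block by slice and counting its '1's; the block size is found by doubling a divisor rather than halving the count, and the dragon fill builds the complement via a join over the reversed string instead of character-by-character concatenation.
import Mathlib
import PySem

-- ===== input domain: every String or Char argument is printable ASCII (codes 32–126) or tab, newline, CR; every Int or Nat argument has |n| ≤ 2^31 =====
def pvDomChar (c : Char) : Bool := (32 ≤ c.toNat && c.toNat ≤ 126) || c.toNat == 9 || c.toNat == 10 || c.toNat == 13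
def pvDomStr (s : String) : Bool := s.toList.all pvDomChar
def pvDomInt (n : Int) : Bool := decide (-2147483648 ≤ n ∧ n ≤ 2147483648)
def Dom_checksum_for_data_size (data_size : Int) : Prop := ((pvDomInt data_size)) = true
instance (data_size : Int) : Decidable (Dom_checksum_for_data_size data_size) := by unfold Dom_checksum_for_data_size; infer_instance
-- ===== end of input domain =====

-- B differs from A in the checksum phase: one streaming pass with a running block parity
-- instead of slicing out each block and counting its '1's (objective: alternative, same cost).

-- ===== PORT A =====

-- module constant `seed` as a list of its characters
def pvSeed : List Char := ['0','0','1','0','1','0','0','0','1','0','1','1','1','1','0','1','0']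

-- length fact the fill loops cite for termination
theorem pvFoldlAppendLen (l init : List Char) (f : Char → Char) :
    (l.foldl (fun b c => b ++ [f c]) init).length = init.length + l.length := by
  induction l generalizing init with
  | nil => simp
  | cons c t ih =>
    simp only [List.foldl_cons]
    rw [ih]
    simp
    omega

-- `while len(a) < data_size: b = ""; for c in a[::-1]: b += ...; a = a + '0' + b`
def aFill (data_size : Int) (a : List Char) : List Char :=
  if (a.length : Int) < data_size then
    aFill data_size (a ++ '0' :: a.reverse.foldl (fun b c => b ++ [if c = '0' then '1' else '0']) [])
  else a
termination_by (data_size - a.length).toNat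
decreasing_by
  have h := pvFoldlAppendLen a.reverse [] (fun c => if c = '0' then '1' else '0')
  simp only [List.length_append, List.length_cons, h, List.length_reverse, List.length_nil] at *
  omega

-- `while block_count % 2 == 0: block_count >>= 1; block_size <<= 1`
-- (the `block_count ≠ 0` conjunct is a totality guard only: Python loops forever on 0)
def aBlocks (block_count block_size : Nat) : Nat × Nat :=
  if block_count % 2 = 0 ∧ block_count ≠ 0 then
    aBlocks (block_count / 2) (block_size * 2)
  else (block_count, block_size)
termination_by block_count
decreasing_by omega

def checksum_for_data_size (data_size : Int) : String :=
  let a := aFill data_size pvSeed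
  let a := PySem.List.slice a none (some data_size)
  let bb := aBlocks a.length 1
  let checksum := (List.range bb.1).foldl (fun (cs : List Char) (i : Nat) =>
    let block := PySem.List.slice a (some ((i : Int) * bb.2)) (some (((i : Int) + 1) * bb.2))
    if PySem.List.count block '1' % 2 = 0 then cs ++ ['1'] else cs ++ ['0']) []
  String.mk checksum

-- ===== PORT B =====

-- `while len(a) < data_size: a = a + '0' + ''.join('1' if c == '0' else '0' for c in reversed(a))`
def bFill (data_size : Int) (a : List Char) : List Char :=
  if (a.length : Int) < data_size then
    bFill data_size (a ++ '0' :: a.reverse.map (fun c => if c = '0' then '1' else '0'))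
  else a
termination_by (data_size - a.length).toNat
decreasing_by
  simp only [List.length_append, List.length_cons, List.length_map, List.length_reverse] at *
  omega

-- `while (len(a) // block_size) % 2 == 0: block_size *= 2`
-- (the `0 < n / block_size` conjunct is a totality guard only: vacuous whenever 0 < n)
def bBlock (n block_size : Nat) : Nat :=
  if n / block_size % 2 = 0 ∧ 0 < n / block_size then
    bBlock n (block_size * 2)
  else block_size
termination_by n + 1 - block_size
decreasing_by
  rename_i h
  have hbs : 0 < block_size := by
    rcases Nat.eq_zero_or_pos block_size with h0 | h0
    · exact absurd h.2 (by simp [h0])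
    · exact h0
  have h2 : 2 ≤ n / block_size := by omega
  have := (Nat.le_div_iff_mul_le hbs).mp h2
  omega

-- the body of `for c in a:` with state (out, parity, pos)
def bScanStep (bs : Nat) (st : List Char × Bool × Nat) (c : Char) : List Char × Bool × Nat :=
  let pos := st.2.2 + 1
  let parity := if c = '1' then !st.2.1 else st.2.1
  if pos % bs = 0 then (st.1 ++ [if parity then '1' else '0'], true, pos)
  else (st.1, parity, pos)

def checksum_for_data_size_alt (data_size : Int) : String :=
  let a := bFill data_size pvSeed
  let a := PySem.List.slice a none (some data_size)
  let bs := bBlock a.length 1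
  let st := a.foldl (bScanStep bs) ([], true, 0)
  String.mk st.1

-- ===== PRECONDITION & SPEC =====

-- Pre_ excludes exactly the inputs on which Python A never RETURNS: for data_size = 0 or
-- data_size ≤ -17 the truncated string is empty and A's halving loop spins forever on 0.
def Pre_checksum_for_data_size (data_size : Int) : Prop :=
  0 < data_size ∨ (-17 < data_size ∧ data_size < 0)
instance (data_size : Int) : Decidable (Pre_checksum_for_data_size data_size) := by
  unfold Pre_checksum_for_data_size; infer_instance

def pvWitness_checksum_for_data_size : Int := 5

def Spec_checksum_for_data_size (data_size : Int) (out : String) : Prop := out = checksum_for_data_size_alt data_size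
instance (data_size : Int) (out : String) : Decidable (Spec_checksum_for_data_size data_size out) := by unfold Spec_checksum_for_data_size; infer_instance

-- ===== CLAIM (what is proved, stated in full; the proofs are below) =====
def Claim_equal_checksum_for_data_size : Prop := ∀ (data_size : Int), Dom_checksum_for_data_size data_size → Pre_checksum_for_data_size data_size → Spec_checksum_for_data_size data_size (checksum_for_data_size data_size)

-- ===== LEMMAS AND PROOFS =====

-- The two fill loops build the same string.
theorem pvFill_eq (d : Int) (a : List Char) : aFill d a = bFill d a := by
  rw [aFill, bFill]
  split
  · rw [PySem.List.foldl_append_singleton_eq_map, List.nil_append]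
    exact pvFill_eq d _
  · rfl
termination_by (d - a.length).toNat
decreasing_by
  simp only [List.length_append, List.length_cons, List.length_map, List.length_reverse] at *
  omega

-- Filling never stops below the requested size.
theorem pvFill_len (d : Int) (a : List Char) : d ≤ ((aFill d a).length : Int) := by
  rw [aFill]
  split
  · exact pvFill_len d _
  · omega
termination_by (d - a.length).toNat
decreasing_by
  have h := pvFoldlAppendLen a.reverse [] (fun c => if c = '0' then '1' else '0')
  simp only [List.length_append, List.length_cons, h, List.length_reverse, List.length_nil] at *
  omega

theorem pvFill_of_ge (d : Int) (a : List Char) (h : d ≤ (a.length : Int)) : aFill d a = a := by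
  rw [aFill]; split <;> [omega; rfl]

-- A's halving loop and B's doubling loop find the same block size.
theorem pvBlocks_eq (bc bs : Nat) (hbs : 0 < bs) :
    (aBlocks bc bs).2 = bBlock (bc * bs) bs := by
  rw [aBlocks, bBlock]
  have hq : bc * bs / bs = bc := Nat.mul_div_cancel bc hbs
  rw [hq]
  by_cases h : bc % 2 = 0 ∧ bc ≠ 0
  · rw [if_pos h, if_pos ⟨h.1, by omega⟩]
    have hdvd : 2 ∣ bc := Nat.dvd_of_mod_eq_zero h.1
    have h2 : bc / 2 * (bs * 2) = bc * bs := by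
      rw [show bc / 2 * (bs * 2) = bc / 2 * 2 * bs by ring, Nat.div_mul_cancel hdvd]
    rw [pvBlocks_eq (bc / 2) (bs * 2) (by omega), h2]
  · rw [if_neg h, if_neg (by omega)]
termination_by bc
decreasing_by omega

-- A's halving loop preserves the product and ends on an odd count.
theorem pvBlocks_spec (bc bs : Nat) :
    (aBlocks bc bs).1 * (aBlocks bc bs).2 = bc * bs ∧ bs ≤ (aBlocks bc bs).2 ∧
      (bc ≠ 0 → (aBlocks bc bs).1 % 2 = 1) := by
  rw [aBlocks]
  by_cases h : bc % 2 = 0 ∧ bc ≠ 0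
  · rw [if_pos h]
    obtain ⟨ih1, ih2, ih3⟩ := pvBlocks_spec (bc / 2) (bs * 2)
    have hdvd : 2 ∣ bc := Nat.dvd_of_mod_eq_zero h.1
    have h2 : bc / 2 * (bs * 2) = bc * bs := by
      rw [show bc / 2 * (bs * 2) = bc / 2 * 2 * bs by ring, Nat.div_mul_cancel hdvd]
    exact ⟨by rw [ih1, h2], by omega, fun _ => ih3 (by omega)⟩
  · rw [if_neg h]
    exact ⟨rfl, le_refl bs, fun hbc => by omega⟩
termination_by bc
decreasing_by omega

-- running parity of '1'-characters vs the '1'-count of the block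
theorem pvToggle_count (h : List Char) (q : Bool) :
    h.foldl (fun b c => if c = '1' then !b else b) q =
      (if PySem.List.count h '1' % 2 = 0 then q else !q) := by
  induction h generalizing q with
  | nil => simp
  | cons c t ih =>
    simp only [List.foldl_cons, ih, PySem.List.count]
    by_cases hc : c = '1' <;> simp [hc] <;> split <;> split <;> simp_all <;> omega

-- consuming one whole block emits exactly its parity character and resets the state
theorem pvScan_block (bs : Nat) (t : List Char) :
    ∀ (h : List Char) (q : Bool) (out : List Char) (p : Nat),
      0 < h.length → h.length ≤ bs → (p + h.length) % bs = 0 →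
      (h ++ t).foldl (bScanStep bs) (out, q, p) =
        t.foldl (bScanStep bs)
          (out ++ [if h.foldl (fun b c => if c = '1' then !b else b) q then '1' else '0'],
           true, p + h.length) := by
  intro h
  induction h with
  | nil => intro q out p h0 _ _; simp at h0
  | cons c h' ih =>
    intro q out p _ hle hmod
    rcases List.eq_nil_or_concat h' with rfl | hne
    · -- last character of the block: emit
      have hb : 0 < bs := by
        rcases Nat.eq_zero_or_pos bs with h0 | h0
        · simp [h0] at hmod
        · exact h0
      simp only [List.cons_append, List.nil_append, List.foldl_cons, bScanStep]
      rw [if_pos (by simpa using hmod)]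
      simp
    · -- middle of the block: no emission
      have hlen : 0 < h'.length := by
        rcases hne with ⟨l, b, rfl⟩; simp
      have hb : 0 < bs := by omega
      have hndvd : (p + 1) % bs ≠ 0 := by
        intro hz
        have d1 : bs ∣ p + 1 := Nat.dvd_of_mod_eq_zero hz
        have d2 : bs ∣ p + (c :: h').length := Nat.dvd_of_mod_eq_zero hmod
        have d3 : bs ∣ h'.length := by
          have e : p + (c :: h').length - (p + 1) = h'.length := by
            simp only [List.length_cons]; omega
          exact e ▸ Nat.dvd_sub d2 d1
        have := Nat.le_of_dvd hlen d3
        simp at hle; omega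
      simp only [List.cons_append, List.foldl_cons, bScanStep]
      rw [if_neg hndvd]
      have harr : p + 1 + h'.length = p + (c :: h').length := by
        simp only [List.length_cons]; omega
      have := ih (if c = '1' then !q else q) out (p + 1) hlen
        (by simp only [List.length_cons] at hle ⊢; omega)
        (by rw [harr]; exact hmod)
      rw [this, harr]
      rfl

-- specialisation of the running parity to an emitted character
theorem pvToggle_count' (h : List Char) :
    (if h.foldl (fun b c => if c = '1' then !b else b) true then '1' else '0') =
      (if PySem.List.count h '1' % 2 = 0 then ('1' : Char) else '0') := by
  rw [pvToggle_count]
  by_cases hP : PySem.List.count h '1' % 2 = 0 <;> simp [hP]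

-- the streaming pass over bc whole blocks produces the bc block-parity characters
theorem pvScan_core (bs : Nat) (hbs : 0 < bs) :
    ∀ (bc : Nat) (a out : List Char) (k : Nat), a.length = bc * bs →
      a.foldl (bScanStep bs) (out, true, k * bs) =
        (out ++ (List.range bc).map (fun i =>
            if PySem.List.count ((a.drop (i * bs)).take bs) '1' % 2 = 0 then '1' else '0'),
         true, (k + bc) * bs) := by
  intro bc
  induction bc with
  | zero =>
    intro a out k ha
    have ha' : a = [] := List.eq_nil_of_length_eq_zero (by simpa using ha)
    subst ha'
    simp
  | succ n ih =>
    intro a out k ha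
    have hlen : (a.take bs).length = bs := by
      simp only [List.length_take, ha, Nat.succ_mul]; omega
    have key := pvScan_block bs (a.drop bs) (a.take bs) true out (k * bs)
        (by omega) (by omega)
        (by rw [hlen, show k * bs + bs = (k + 1) * bs by ring]; exact Nat.mul_mod_left _ _)
    rw [List.take_append_drop] at key
    rw [key, pvToggle_count']
    have hd : (a.drop bs).length = n * bs := by
      simp only [List.length_drop, ha, Nat.succ_mul]; omega
    have := ih (a.drop bs) (out ++ [if PySem.List.count (a.take bs) '1' % 2 = 0 then '1' else '0'])
        (k + 1) hd
    rw [hlen, show k * bs + bs = (k + 1) * bs by ring, this]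
    have hmap : (List.range (n + 1)).map (fun i =>
          if PySem.List.count ((a.drop (i * bs)).take bs) '1' % 2 = 0 then '1' else '0') =
        (if PySem.List.count (a.take bs) '1' % 2 = 0 then '1' else '0') ::
          (List.range n).map (fun i =>
            if PySem.List.count (((a.drop bs).drop (i * bs)).take bs) '1' % 2 = 0 then '1' else '0') := by
      rw [List.range_succ_eq_map, List.map_cons, List.map_map]
      simp only [Nat.zero_mul, List.drop_zero]
      congr 1
      apply List.map_congr_left
      intro i _
      have hdd : (a.drop bs).drop (i * bs) = a.drop (Nat.succ i * bs) := by
        rw [List.drop_drop]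
        congr 1
        simp [Nat.succ_mul, Nat.add_comm]
      simp only [Function.comp_apply, hdd]
    rw [hmap]
    simp only [List.append_assoc, List.singleton_append]
    have hk : k + 1 + n = k + (n + 1) := by omega
    rw [hk]

-- the two checksum phases agree on every nonempty string
theorem pvPhase_eq (a : List Char) (ha : a.length ≠ 0) :
    String.mk ((List.range (aBlocks a.length 1).1).foldl (fun (cs : List Char) (i : Nat) =>
        let block := PySem.List.slice a (some ((i : Int) * (aBlocks a.length 1).2))
          (some (((i : Int) + 1) * (aBlocks a.length 1).2))
        if PySem.List.count block '1' % 2 = 0 then cs ++ ['1'] else cs ++ ['0']) []) =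
      String.mk ((a.foldl (bScanStep (bBlock a.length 1)) ([], true, 0)).1) := by
  obtain ⟨hprod, hle, hodd⟩ := pvBlocks_spec a.length 1
  set bc := (aBlocks a.length 1).1 with hbc
  set bs := (aBlocks a.length 1).2 with hbs
  have hbseq : bBlock a.length 1 = bs := by
    have := pvBlocks_eq a.length 1 (by omega)
    simpa using this.symm
  have hlen : a.length = bc * bs := by simpa using hprod.symm
  -- A's appending loop is a map over the block indices
  have hA : ∀ (l : List Nat) (init : List Char),
      l.foldl (fun (cs : List Char) (i : Nat) =>
        let block := PySem.List.slice a (some ((i : Int) * bs)) (some (((i : Int) + 1) * bs))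
        if PySem.List.count block '1' % 2 = 0 then cs ++ ['1'] else cs ++ ['0']) init =
      init ++ l.map (fun i =>
        if PySem.List.count ((a.drop (i * bs)).take bs) '1' % 2 = 0 then '1' else '0') := by
    intro l
    induction l with
    | nil => simp
    | cons j t ih =>
      intro init
      have hsl : PySem.List.slice a (some ((j : Int) * bs)) (some (((j : Int) + 1) * bs)) =
          (a.drop (j * bs)).take bs := by
        have h1 : ((j : Int) * bs) = ((j * bs : Nat) : Int) := by push_cast; ring
        have h2 : (((j : Int) + 1) * bs) = (((j + 1) * bs : Nat) : Int) := by push_cast; ring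
        rw [h1, h2, PySem.List.slice_natCast]
        congr 1
        have h3 : (j + 1) * bs = j * bs + bs := by ring
        rw [h3]
        omega
      rw [List.foldl_cons, ih]
      simp only [hsl]
      by_cases hc : PySem.List.count ((a.drop (j * bs)).take bs) '1' % 2 = 0
      · rw [if_pos hc]
        have hc' : List.count '1' ((a.drop (j * bs)).take bs) % 2 = 0 := by
          simpa [PySem.List.count] using hc
        simp [hc']
      · rw [if_neg hc]
        have hc' : ¬ List.count '1' ((a.drop (j * bs)).take bs) % 2 = 0 := by
          simpa [PySem.List.count] using hc
        simp [hc']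
  have hsc := pvScan_core bs (by omega) bc a [] 0 hlen
  simp only [Nat.zero_mul, Nat.zero_add, List.nil_append] at hsc
  rw [hA, hbseq, hsc]
  rfl

-- ===== VERDICT (by name: the statement is the Claim_ definition above) =====
theorem checksum_for_data_size_spec : Claim_equal_checksum_for_data_size := by
  intro d _ hpre
  have h17 : pvSeed.length = 17 := rfl
  simp only [Spec_checksum_for_data_size, checksum_for_data_size, checksum_for_data_size_alt]
  rw [← pvFill_eq]
  have hlen : (PySem.List.slice (aFill d pvSeed) none (some d)).length ≠ 0 := by
    rcases hpre with hpos | ⟨hlo, hhi⟩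
    · have hfl := pvFill_len d pvSeed
      rw [PySem.List.slice_to _ (by omega)]
      simp only [List.length_take]
      omega
    · have hseed : aFill d pvSeed = pvSeed :=
        pvFill_of_ge d pvSeed (by rw [h17]; omega)
      have hk : d = -(((-d).toNat : Nat) : Int) := by omega
      rw [hseed, hk, PySem.List.slice_to_neg_natCast _ _ (by omega)]
      simp only [List.length_take, h17]
      omega
  exact pvPhase_eq _ hlen
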